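-- pv_equiv track=rewrite | github.com/Zzhaoo/NJU-2021-LCYOJ | 5/5-6.py | solute
-- ===== SOURCE A (Python) =====
-- def solute(pairs: list):
--     link, vals = {}, {}
--     for pair in pairs:
--         link[pair[0]] = pair[1]
--         vals[(pair[0], pair[1])] = pair[2]
--     starts = set(link.keys()) - set(link.values())
--     ans = []
--     for s in starts:
--         e = link[s]
--         val = vals[(s, e)]
--         while e in link:
--             val = min(val, vals[e, link[e]])
--             e = link[e]
--         ans.append((s, e, val))
--     return sorted(ans)
-- ===== SOURCE B (Python) =====
-- def solute(pairs: list):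
--     link, vals = {}, {}
--     for a, b, w in pairs:
--         link[a] = b
--         vals[(a, b)] = w
--     memo = {}  # node -> (chain end, min weight from this node to the end)
--     ans = []
--     for s in set(link) - set(link.values()):
--         # collect the unmemoized prefix of the chain starting at s
--         path, k = [], s
--         while k in link and k not in memo:
--             path.append(k)
--             k = link[k]
--         if k in memo:
--             end, val = memo[k]
--         else:
--             end, val = k, None
--         # fill in memo back-to-front so shared suffixes are computed once
--         for node in reversed(path):
--             w = vals[(node, link[node])]
--             val = w if val is None else min(w, val)
--             memo[node] = (end, val)
--         ans.append((s,) + memo[s])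
--     return sorted(ans)
-- ===== Notes on version B (the rewrite author's own statement) =====
-- stated objective: alternative
-- what changed: B replaces A's independent forward min-walk per chain start with a back-to-front memoized DP: each start collects only the not-yet-memoized prefix of its chain and fills a memo (node -> (end, suffix-min)) in reverse, so suffixes shared by several starts are traversed once; A re-walks them per start.
import Mathlib
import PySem

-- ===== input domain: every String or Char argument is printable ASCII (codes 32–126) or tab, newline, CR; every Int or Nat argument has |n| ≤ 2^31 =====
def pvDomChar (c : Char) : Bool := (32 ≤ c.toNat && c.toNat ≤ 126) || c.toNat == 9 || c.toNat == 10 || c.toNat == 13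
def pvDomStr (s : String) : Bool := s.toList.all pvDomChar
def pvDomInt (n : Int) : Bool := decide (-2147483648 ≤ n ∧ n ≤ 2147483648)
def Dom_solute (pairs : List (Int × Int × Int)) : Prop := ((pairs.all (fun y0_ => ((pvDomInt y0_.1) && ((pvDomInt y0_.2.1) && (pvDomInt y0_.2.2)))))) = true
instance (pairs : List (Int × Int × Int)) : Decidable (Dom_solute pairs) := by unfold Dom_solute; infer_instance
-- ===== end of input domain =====

-- B replaces A's per-start forward min-walk by a back-to-front memoized DP over chain suffixes
-- (alternative decomposition; equivalence of the RETURN values is what is proved, on inputs where A's walk terminates).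

-- shared first loop of both Pythons: build link / vals with last-write-wins
def pvBuild (pairs : List (Int × Int × Int)) : PySem.Dict Int Int × PySem.Dict (Int × Int) Int :=
  pairs.foldl (fun st p => (st.1.insert p.1 p.2.1, st.2.insert (p.1, p.2.1) p.2.2))
    (PySem.Dict.empty, PySem.Dict.empty)

-- ===== PORT A =====
-- the while loop of A, fuel = number of keys (enough on every input admitted by Pre_solute)
def pvWalkA (link : PySem.Dict Int Int) (vals : PySem.Dict (Int × Int) Int) :
    Nat → Int → Int → Int × Int
  | 0, e, val => (e, val)
  | f+1, e, val =>
      if link.contains e then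
        pvWalkA link vals f (link.getD e 0) (min val (vals.getD (e, link.getD e 0) 0))
      else (e, val)

-- sorted(ans): the first components (the starts) are pairwise distinct, so Python's
-- lexicographic tuple sort coincides with the stable sort by the first component used here.
def solute (pairs : List (Int × Int × Int)) : List (Int × Int × Int) :=
  let link := (pvBuild pairs).1
  let vals := (pvBuild pairs).2
  let starts := PySem.Set.diff (PySem.Set.ofList link.keys) (PySem.Set.ofList link.values)
  PySem.List.sorted
    (starts.foldl (fun ans s =>
        let e := link.getD s 0
        let val := vals.getD (s, e) 0
        let r := pvWalkA link vals link.keys.length e val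
        ans ++ [(s, r.1, r.2)]) [])
    (fun t => t.1) false

-- ===== PORT B =====
-- collect the not-yet-memoized prefix of the chain from k (B's first while loop; same fuel bound)
def pvCollect (link : PySem.Dict Int Int) (memo : PySem.Dict Int (Int × Int)) :
    Nat → Int → List Int × Int
  | 0, k => ([], k)
  | f+1, k =>
      if link.contains k && !memo.contains k then
        let r := pvCollect link memo f (link.getD k 0)
        (k :: r.1, r.2)
      else ([], k)

-- B's 'if k in memo: end, val = memo[k] else: end, val = k, None'
def pvInit (memo : PySem.Dict Int (Int × Int)) (k : Int) : Int × Option Int :=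
  match memo.get? k with
  | some ev => (ev.1, some ev.2)
  | none => (k, none)

-- one step of B's 'for node in reversed(path)' loop
def pvUnwind (link : PySem.Dict Int Int) (vals : PySem.Dict (Int × Int) Int) (e0 : Int)
    (st : Option Int × PySem.Dict Int (Int × Int)) (node : Int) :
    Option Int × PySem.Dict Int (Int × Int) :=
  let w := vals.getD (node, link.getD node 0) 0
  let v := match st.1 with | none => w | some v0 => min w v0
  (some v, st.2.insert node (e0, v))

-- B's whole body for one start s: collect, then fill memo back-to-front
def pvProcess (link : PySem.Dict Int Int) (vals : PySem.Dict (Int × Int) Int)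
    (memo : PySem.Dict Int (Int × Int)) (f : Nat) (s : Int) :
    Option Int × PySem.Dict Int (Int × Int) :=
  let pr := pvCollect link memo f s
  let init := pvInit memo pr.2
  pr.1.reverse.foldl (pvUnwind link vals init.1) (init.2, memo)

def solute_alt (pairs : List (Int × Int × Int)) : List (Int × Int × Int) :=
  let link := (pvBuild pairs).1
  let vals := (pvBuild pairs).2
  let starts := PySem.Set.diff (PySem.Set.ofList link.keys) (PySem.Set.ofList link.values)
  let res := starts.foldl
    (fun (st : PySem.Dict Int (Int × Int) × List (Int × Int × Int)) s =>
      let fin := pvProcess link vals st.1 link.keys.length s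
      let r := fin.2.getD s (0, 0)
      (fin.2, st.2 ++ [(s, r.1, r.2)]))
    (PySem.Dict.empty, [])
  PySem.List.sorted res.2 (fun t => t.1) false

-- ===== PRECONDITION & SPEC =====
-- the forward orbit of the link map (stops once outside the keys)
def pvOrbit (link : PySem.Dict Int Int) : Nat → Int → Int
  | 0, k => k
  | f+1, k => if link.contains k then pvOrbit link f (link.getD k 0) else k

-- Pre_ excludes exactly the inputs on which A DIVERGES: some chain start's walk runs into a
-- cycle and A's while loop never terminates. On every input where A returns, Pre_ holds.
-- pvOrbit above is plain k-fold application of the input's link map — a property of the input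
-- graph (the chain from a start terminates), computing no mins/ends/memo of either port.
def Pre_solute (pairs : List (Int × Int × Int)) : Prop :=
  ∀ k ∈ (pvBuild pairs).1.keys, k ∉ (pvBuild pairs).1.values →
    (pvBuild pairs).1.contains
      (pvOrbit (pvBuild pairs).1 (pvBuild pairs).1.keys.length k) = false
instance (pairs : List (Int × Int × Int)) : Decidable (Pre_solute pairs) := by
  unfold Pre_solute; infer_instance

def pvWitness_solute : (List (Int × Int × Int)) := [(1, 2, 5), (2, 3, 4), (7, 3, 1)]

def Spec_solute (pairs : List (Int × Int × Int)) (out : List (Int × Int × Int)) : Prop := out = solute_alt pairs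
instance (pairs : List (Int × Int × Int)) (out : List (Int × Int × Int)) : Decidable (Spec_solute pairs out) := by unfold Spec_solute; infer_instance

-- ===== CLAIM (what is proved, stated in full; the proofs are below) =====
def Claim_equal_solute : Prop := ∀ (pairs : List (Int × Int × Int)), Dom_solute pairs → Pre_solute pairs → Spec_solute pairs (solute pairs)

-- ===== LEMMAS AND PROOFS =====

-- the walk from e leaves the key set within f steps
def ExitsL (link : PySem.Dict Int Int) (f : Nat) (e : Int) : Prop :=
  link.contains (pvOrbit link f e) = false

-- A's per-start value as a function of the start/node
def chainF (link : PySem.Dict Int Int) (vals : PySem.Dict (Int × Int) Int) (k : Int) : Int × Int :=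
  pvWalkA link vals link.keys.length (link.getD k 0) (vals.getD (k, link.getD k 0) 0)

-- every memo entry is a correct chain value at a key of link
def GoodM (link : PySem.Dict Int Int) (vals : PySem.Dict (Int × Int) Int)
    (memo : PySem.Dict Int (Int × Int)) : Prop :=
  ∀ k p, memo.get? k = some p → link.contains k = true ∧ p = chainF link vals k

theorem orbit_stable (link : PySem.Dict Int Int) (f : Nat) :
    ∀ e : Int, ExitsL link f e → pvOrbit link (f+1) e = pvOrbit link f e := by
  induction f with
  | zero =>
      intro e h
      simp only [ExitsL, pvOrbit] at h ⊢
      simp [h]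
  | succ f ih =>
      intro e h
      by_cases hc : link.contains e = true
      · simp only [ExitsL, pvOrbit, hc, if_true] at h ⊢
        exact ih _ h
      · simp only [Bool.not_eq_true] at hc
        simp [pvOrbit, hc]

theorem exits_succ (link : PySem.Dict Int Int) (f : Nat) (e : Int)
    (h : ExitsL link f e) : ExitsL link (f+1) e := by
  unfold ExitsL at h ⊢
  rw [orbit_stable link f e h]; exact h

theorem exits_mono (link : PySem.Dict Int Int) {f g : Nat} (hfg : f ≤ g) (e : Int)
    (h : ExitsL link f e) : ExitsL link g e := by
  induction g, hfg using Nat.le_induction with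
  | base => exact h
  | succ g _ ih => exact exits_succ link g e ih

theorem exits_step (link : PySem.Dict Int Int) (f : Nat) (e : Int)
    (hc : link.contains e = true) (h : ExitsL link (f+1) e) :
    ExitsL link f (link.getD e 0) := by
  unfold ExitsL at h ⊢
  simpa [pvOrbit, hc] using h

theorem walk_stable (link : PySem.Dict Int Int) (vals : PySem.Dict (Int × Int) Int) (f : Nat) :
    ∀ (e v : Int), ExitsL link f e → pvWalkA link vals (f+1) e v = pvWalkA link vals f e v := by
  induction f with
  | zero =>
      intro e v h
      simp only [ExitsL, pvOrbit] at h
      simp [pvWalkA, h]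
  | succ f ih =>
      intro e v h
      by_cases hc : link.contains e = true
      · have h' := exits_step link f e hc h
        simp only [pvWalkA, hc, if_true]
        exact ih _ _ h'
      · simp only [Bool.not_eq_true] at hc
        simp [pvWalkA, hc]

theorem walk_min (link : PySem.Dict Int Int) (vals : PySem.Dict (Int × Int) Int) (f : Nat) :
    ∀ (e a b : Int), pvWalkA link vals f e (min a b)
      = ((pvWalkA link vals f e b).1, min a (pvWalkA link vals f e b).2) := by
  induction f with
  | zero => intro e a b; simp [pvWalkA]
  | succ f ih =>
      intro e a b
      by_cases hc : link.contains e = true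
      · simp only [pvWalkA, hc, if_true]
        rw [min_assoc]
        exact ih _ _ _
      · simp only [Bool.not_eq_true] at hc
        simp [pvWalkA, hc]

theorem keys_pos_of_contains (link : PySem.Dict Int Int) (k : Int)
    (hk : link.contains k = true) : 0 < link.keys.length := by
  have hmem : k ∈ link.keys := (PySem.Dict.contains_iff_mem_keys _ _).mp hk
  exact List.length_pos_of_mem hmem

-- the DP recurrence A's walk satisfies on terminating chains
theorem chain_rec (link : PySem.Dict Int Int) (vals : PySem.Dict (Int × Int) Int) (k : Int)
    (hk : link.contains k = true) (hex : ExitsL link link.keys.length k) :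
    chainF link vals k =
      if link.contains (link.getD k 0) then
        ((chainF link vals (link.getD k 0)).1,
          min (vals.getD (k, link.getD k 0) 0) (chainF link vals (link.getD k 0)).2)
      else (link.getD k 0, vals.getD (k, link.getD k 0) 0) := by
  obtain ⟨m, hm⟩ : ∃ m, link.keys.length = m + 1 :=
    ⟨link.keys.length - 1, (Nat.succ_pred_eq_of_pos (keys_pos_of_contains link k hk)).symm⟩
  set e := link.getD k 0 with he
  have hL : chainF link vals k
      = pvWalkA link vals (m+1) e (vals.getD (k, e) 0) := by
    unfold chainF; rw [hm, he]
  by_cases hce : link.contains e = true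
  · have hexe : ExitsL link m e := by
      have := exits_step link m k hk (by rwa [hm] at hex)
      rwa [← he] at this
    have hme : pvWalkA link vals m (link.getD e 0) (vals.getD (e, link.getD e 0) 0)
        = chainF link vals e := by
      unfold chainF
      rw [hm]
      cases m with
      | zero =>
          exfalso
          simp only [ExitsL, pvOrbit] at hexe
          rw [hexe] at hce; exact Bool.false_ne_true hce
      | succ m0 =>
          have h0 : ExitsL link m0 (link.getD e 0) := exits_step link m0 e hce hexe
          exact (walk_stable link vals (m0+1) _ _ (exits_succ link m0 _ h0)).symm
    rw [hL]
    simp only [pvWalkA, hce, if_true]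
    rw [walk_min, hme]
  · simp only [Bool.not_eq_true] at hce
    rw [hL]
    simp [pvWalkA, hce]

theorem collect_nil (link : PySem.Dict Int Int) (memo : PySem.Dict Int (Int × Int))
    (f : Nat) (k : Int) (h : (pvCollect link memo f k).1 = []) :
    (pvCollect link memo f k).2 = k := by
  cases f with
  | zero => rfl
  | succ f =>
      by_cases hc : (link.contains k && !memo.contains k) = true
      · simp [pvCollect, hc] at h
      · simp [pvCollect, hc]

theorem collect_not_contains (link : PySem.Dict Int Int) (memo : PySem.Dict Int (Int × Int))
    (f : Nat) (k : Int) (hc : link.contains k = false) :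
    pvCollect link memo f k = ([], k) := by
  cases f with
  | zero => rfl
  | succ f => simp [pvCollect, hc]

-- correctness of B's per-start processing, by induction on the fuel
theorem process_correct (link : PySem.Dict Int Int) (vals : PySem.Dict (Int × Int) Int) :
    ∀ (f : Nat) (s : Int) (memo : PySem.Dict Int (Int × Int)),
      f ≤ link.keys.length → GoodM link vals memo → ExitsL link f s →
      GoodM link vals (pvProcess link vals memo f s).2
      ∧ (link.contains s = true →
          (pvProcess link vals memo f s).2.get? s = some (chainF link vals s))
      ∧ ((pvCollect link memo f s).1 ≠ [] →
          (pvProcess link vals memo f s).1 = some (chainF link vals s).2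
          ∧ (pvInit memo (pvCollect link memo f s).2).1 = (chainF link vals s).1) := by
  intro f
  induction f with
  | zero =>
      intro s memo _ hgood hex
      refine ⟨by simpa [pvProcess, pvCollect] using hgood, ?_, by simp [pvCollect]⟩
      intro hcs
      simp only [ExitsL, pvOrbit] at hex
      rw [hex] at hcs; exact absurd hcs (Bool.false_ne_true)
  | succ f ih =>
      intro s memo hle hgood hex
      by_cases hc : (link.contains s && !memo.contains s) = true
      · obtain ⟨hcs, hms⟩ := Bool.and_eq_true_iff.mp hc
        have hms' : memo.contains s = false := by simpa using hms
        set e := link.getD s 0 with he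
        have hcol : pvCollect link memo (f+1) s
            = (s :: (pvCollect link memo f e).1, (pvCollect link memo f e).2) := by
          simp [pvCollect, hc, ← he]
        have hprs : pvProcess link vals memo (f+1) s
            = pvUnwind link vals (pvInit memo (pvCollect link memo f e).2).1
                (pvProcess link vals memo f e) s := by
          simp [pvProcess, hcol, List.foldl_append]
        have hexe : ExitsL link f e := by
          have := exits_step link f s hcs hex; rwa [← he] at this
        obtain ⟨G1, G2, G3⟩ := ih e memo (Nat.le_of_succ_le hle) hgood hexe
        have hchain : chainF link vals s =
            if link.contains e then
              ((chainF link vals e).1, min (vals.getD (s, e) 0) (chainF link vals e).2)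
            else (e, vals.getD (s, e) 0) := by
          have := chain_rec link vals s hcs (exits_mono link hle s hex)
          rwa [← he] at this
        -- show that the value inserted at s is exactly chainF s
        have hkey : ((pvInit memo (pvCollect link memo f e).2).1,
            (match (pvProcess link vals memo f e).1 with
             | none => vals.getD (s, e) 0
             | some v0 => min (vals.getD (s, e) 0) v0)) = chainF link vals s := by
          by_cases hce : link.contains e = true
          · rw [hchain]; simp only [hce, if_true]
            by_cases hr : (pvCollect link memo f e).1 = []
            · have hre : (pvCollect link memo f e).2 = e := collect_nil link memo f e hr
              have hfin : pvProcess link vals memo f e = ((pvInit memo e).2, memo) := by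
                have : pvCollect link memo f e = ([], e) := by
                  cases hcc : pvCollect link memo f e with
                  | mk a b => simp_all
                simp [pvProcess, this]
              cases hme : memo.get? e with
              | some p =>
                  have hp := (hgood e p hme).2
                  rw [hre, hfin]
                  simp [pvInit, hme, hp]
              | none =>
                  exfalso
                  -- the collect loop cannot stop at a live unmemoized key with fuel left,
                  -- unless the fuel is 0, which ExitsL rules out
                  cases f with
                  | zero =>
                      simp only [ExitsL, pvOrbit] at hexe
                      rw [hexe] at hce; exact Bool.false_ne_true hce
                  | succ f0 =>
                      have hmce : memo.contains e = false := by
                        rw [PySem.Dict.contains_eq_isSome_get?, hme]; rfl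
                      simp [pvCollect, hce, hmce] at hr
            · obtain ⟨hfe, hie⟩ := G3 hr
              rw [hfe, hie]
          · simp only [Bool.not_eq_true] at hce
            have hcol0 : pvCollect link memo f e = ([], e) :=
              collect_not_contains link memo f e hce
            have hfin : pvProcess link vals memo f e = ((pvInit memo e).2, memo) := by
              simp [pvProcess, hcol0]
            cases hme : memo.get? e with
            | some p =>
                exfalso
                have := (hgood e p hme).1
                rw [hce] at this; exact Bool.false_ne_true this
            | none =>
                rw [hchain]
                simp [hce, hcol0, hfin, pvInit, hme]
        rw [hprs]
        cases hfinE : pvProcess link vals memo f e with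
        | mk fv fm =>
            rw [hfinE] at hkey G1 G2
            simp only [pvUnwind, ← he]
            refine ⟨?_, ?_, ?_⟩
            · -- GoodM after the insert
              intro k p hkp
              rw [PySem.Dict.get?_insert] at hkp
              by_cases hks : k = s
              · simp only [hks, if_true] at hkp
                refine ⟨by simpa [hks] using hcs, ?_⟩
                have := hkey
                simp only at this
                rw [hks, ← this]
                exact (Option.some_inj.mp hkp).symm
              · simp only [hks, if_false] at hkp
                exact G1 k p hkp
            · intro _
              rw [PySem.Dict.get?_insert_self, hkey]
            · intro _
              refine ⟨?_, ?_⟩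
              · exact congrArg (fun z => some z.2) hkey
              · rw [hcol]
                exact congrArg Prod.fst hkey
      · -- collect stops immediately: either s is not a key or it is already memoized
        have hcol : pvCollect link memo (f+1) s = ([], s) := by
          simp [pvCollect, hc]
        have hfin : pvProcess link vals memo (f+1) s = ((pvInit memo s).2, memo) := by
          simp [pvProcess, hcol]
        refine ⟨by simpa [hfin] using hgood, ?_, by simp [hcol]⟩
        intro hcs
        have hms : memo.contains s = true := by
          cases hm : memo.contains s
          · exact absurd (by simp [hcs, hm]) hc
          · rfl
        cases hme : memo.get? s with
        | none =>
            exfalso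
            rw [PySem.Dict.contains_eq_isSome_get?, hme] at hms
            simp at hms
        | some p =>
            rw [hfin]
            simp only
            rw [hme, (hgood s p hme).2]

theorem foldl_append_map {α β : Type} (g : α → β) :
    ∀ (l : List α) (acc : List β),
      l.foldl (fun ans s => ans ++ [g s]) acc = acc ++ l.map g := by
  intro l
  induction l with
  | nil => intro acc; simp
  | cons x xs ih => intro acc; simp [ih]

theorem foldl_B (link : PySem.Dict Int Int) (vals : PySem.Dict (Int × Int) Int) :
    ∀ (l : List Int) (memo : PySem.Dict Int (Int × Int)) (acc : List (Int × Int × Int)),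
      (∀ s ∈ l, link.contains s = true ∧ ExitsL link link.keys.length s) →
      GoodM link vals memo →
      (l.foldl
        (fun (st : PySem.Dict Int (Int × Int) × List (Int × Int × Int)) s =>
          let fin := pvProcess link vals st.1 link.keys.length s
          let r := fin.2.getD s (0, 0)
          (fin.2, st.2 ++ [(s, r.1, r.2)])) (memo, acc)).2
      = acc ++ l.map (fun s => (s, (chainF link vals s).1, (chainF link vals s).2)) := by
  intro l
  induction l with
  | nil => intro memo acc _ _; simp
  | cons s l ih =>
      intro memo acc hmem hgood
      obtain ⟨hcs, hex⟩ := hmem s (List.mem_cons_self)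
      obtain ⟨G1, G2, _⟩ :=
        process_correct link vals link.keys.length s memo (le_refl _) hgood hex
      have hget : (pvProcess link vals memo link.keys.length s).2.getD s (0, 0)
          = chainF link vals s := by
        rw [PySem.Dict.getD_eq_get?_getD, G2 hcs]; rfl
      simp only [List.foldl_cons]
      rw [ih _ _ (fun t ht => hmem t (List.mem_cons_of_mem _ ht)) G1]
      simp [hget]

-- ===== VERDICT (by name: the statement is the Claim_ definition above) =====
theorem solute_spec : Claim_equal_solute := by
  intro pairs _ hpre
  unfold Spec_solute solute solute_alt
  simp only []
  set link := (pvBuild pairs).1 with hlink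
  set vals := (pvBuild pairs).2 with hvals
  set starts := PySem.Set.diff (PySem.Set.ofList link.keys) (PySem.Set.ofList link.values)
    with hstarts
  have hmem : ∀ s ∈ starts, link.contains s = true ∧ ExitsL link link.keys.length s := by
    intro s hs
    rw [hstarts] at hs
    have := (PySem.Set.mem_diff _ _ _).mp hs
    have hk : s ∈ link.keys := (PySem.Set.mem_ofList _ _).mp this.1
    have hv : s ∉ link.values := fun hv => this.2 ((PySem.Set.mem_ofList _ _).mpr hv)
    exact ⟨(PySem.Dict.contains_iff_mem_keys _ _).mpr hk, hpre s hk hv⟩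
  have hA : starts.foldl (fun ans s =>
        let e := link.getD s 0
        let val := vals.getD (s, e) 0
        let r := pvWalkA link vals link.keys.length e val
        ans ++ [(s, r.1, r.2)]) []
      = starts.map (fun s => (s, (chainF link vals s).1, (chainF link vals s).2)) := by
    have := foldl_append_map
      (fun s => (s, (chainF link vals s).1, (chainF link vals s).2)) starts []
    simpa [chainF] using this
  have hB := foldl_B link vals starts PySem.Dict.empty [] hmem
    (by intro k p h; simp [PySem.Dict.get?_empty] at h)
  rw [hA, hB]
  simp
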